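-- pv_equiv track=rewrite | github.com/jet52/judicial-opinion-edit-skill | skills/jetredline/splitmarks.py | calculate_page_ranges
-- ===== SOURCE A (Python) =====
-- def calculate_page_ranges(
--     bookmarks: list[tuple[str, int]], total_pages: int
-- ) -> list[tuple[str, int, int]]:
--     """
--     Calculate page ranges for each bookmark section.
--
--     Returns list of (title, start_page, end_page) tuples.
--     end_page is inclusive.
--     """
--     ranges = []
--
--     for i, (title, start_page) in enumerate(bookmarks):
--         if i + 1 < len(bookmarks):
--             # End at page before next bookmark
--             end_page = bookmarks[i + 1][1] - 1
--         else:
--             # Last bookmark goes to end of document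
--             end_page = total_pages - 1
--
--         # Ensure valid range
--         if end_page >= start_page:
--             ranges.append((title, start_page, end_page))
--
--     return ranges
-- ===== SOURCE B (Python) =====
-- def calculate_page_ranges(
--     bookmarks: list[tuple[str, int]], total_pages: int
-- ) -> list[tuple[str, int, int]]:
--     """Single backward pass: walk the bookmarks in reverse, carrying the
--     exclusive boundary (start of the following section, total_pages for the
--     last one), then reverse the collected ranges."""
--     ranges = []
--     boundary = total_pages
--     for title, start_page in reversed(bookmarks):
--         end_page = boundary - 1
--         if end_page >= start_page:
--             ranges.append((title, start_page, end_page))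
--         boundary = start_page
--     ranges.reverse()
--     return ranges
-- ===== Notes on version B (the rewrite author's own statement) =====
-- stated objective: alternative
-- what changed: Replaces A's indexed forward loop (enumerate plus bookmarks[i+1] lookup with a last-element special case) by a single backward pass that carries the exclusive boundary in an accumulator, needing no indexing and no branch on position.
import Mathlib
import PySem

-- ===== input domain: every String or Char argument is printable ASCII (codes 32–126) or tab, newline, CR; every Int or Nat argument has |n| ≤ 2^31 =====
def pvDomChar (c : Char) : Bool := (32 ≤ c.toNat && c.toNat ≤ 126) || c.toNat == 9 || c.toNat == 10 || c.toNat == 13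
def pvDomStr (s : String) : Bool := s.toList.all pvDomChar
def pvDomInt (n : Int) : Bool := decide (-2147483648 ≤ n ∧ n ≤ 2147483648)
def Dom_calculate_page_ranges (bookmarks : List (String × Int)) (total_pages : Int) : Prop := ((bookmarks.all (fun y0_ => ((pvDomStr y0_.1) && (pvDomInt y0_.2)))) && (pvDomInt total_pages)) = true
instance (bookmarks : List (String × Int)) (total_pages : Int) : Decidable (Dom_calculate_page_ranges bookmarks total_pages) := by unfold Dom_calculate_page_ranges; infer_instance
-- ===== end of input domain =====

-- ===== PORT A =====
-- Literal port of A: fold over enumerate(bookmarks); the i+1 < len branch reads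
-- bookmarks[i+1] (always in range there, so pyGetD's default is never used).
def calculate_page_ranges (bookmarks : List (String × Int)) (total_pages : Int) : List (String × Int × Int) :=
  (PySem.List.enumerate bookmarks 0).foldl
    (fun ranges p =>
      let i := p.1
      let title := p.2.1
      let start_page := p.2.2
      let end_page :=
        if i + 1 < (bookmarks.length : Int) then
          (PySem.List.pyGetD bookmarks (i + 1) ("", 0)).2 - 1
        else
          total_pages - 1
      if end_page ≥ start_page then ranges ++ [(title, start_page, end_page)] else ranges)
    []

-- ===== PORT B =====
-- B: one backward pass carrying the exclusive boundary; the collected list is reversed at the end.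
def calculate_page_ranges_alt (bookmarks : List (String × Int)) (total_pages : Int) : List (String × Int × Int) :=
  let st := bookmarks.reverse.foldl
    (fun (st : Int × List (String × Int × Int)) p =>
      let end_page := st.1 - 1
      let acc := if end_page ≥ p.2 then st.2 ++ [(p.1, p.2, end_page)] else st.2
      (p.2, acc))
    (total_pages, [])
  st.2.reverse

-- ===== PRECONDITION & SPEC =====
def Spec_calculate_page_ranges (bookmarks : List (String × Int)) (total_pages : Int) (out : List (String × Int × Int)) : Prop := out = calculate_page_ranges_alt bookmarks total_pages
instance (bookmarks : List (String × Int)) (total_pages : Int) (out : List (String × Int × Int)) : Decidable (Spec_calculate_page_ranges bookmarks total_pages out) := by unfold Spec_calculate_page_ranges; infer_instance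

-- ===== CLAIM (what is proved, stated in full; the proofs are below) =====
def Claim_equal_calculate_page_ranges : Prop := ∀ (bookmarks : List (String × Int)) (total_pages : Int), Dom_calculate_page_ranges bookmarks total_pages → Spec_calculate_page_ranges bookmarks total_pages (calculate_page_ranges bookmarks total_pages)

-- ===== LEMMAS AND PROOFS =====

-- Common characterisation: the section list with exclusive boundary b0 for the LAST element.
def pvSpec (tp : Int) : List (String × Int) → List (String × Int × Int)
  | [] => []
  | (t, s) :: rest =>
    let b := match rest with | [] => tp | (_, s') :: _ => s'
    (if b - 1 ≥ s then [(t, s, b - 1)] else []) ++ pvSpec tp rest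

def pvHead (b0 : Int) : List (String × Int) → Int
  | [] => b0
  | (_, s) :: _ => s

theorem pvB_go (l : List (String × Int)) :
    ∀ (b0 : Int) (acc : List (String × Int × Int)),
      l.reverse.foldl
        (fun (st : Int × List (String × Int × Int)) p =>
          let end_page := st.1 - 1
          let acc := if end_page ≥ p.2 then st.2 ++ [(p.1, p.2, end_page)] else st.2
          (p.2, acc))
        (b0, acc)
      = (pvHead b0 l, acc ++ (pvSpec b0 l).reverse) := by
  induction l with
  | nil => intro b0 acc; simp [pvHead, pvSpec]
  | cons x rest ih =>
    intro b0 acc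
    obtain ⟨t, s⟩ := x
    rw [List.reverse_cons, List.foldl_append, ih b0 acc]
    simp only [List.foldl_cons, List.foldl_nil, pvHead, pvSpec]
    cases rest with
    | nil => simp; split_ifs <;> simp
    | cons y rest' =>
      obtain ⟨t', s'⟩ := y
      split_ifs <;> simp

theorem pvA_go (tp : Int) (orig : List (String × Int)) :
    ∀ (suf pre : List (String × Int)), orig = pre ++ suf →
    ∀ (acc : List (String × Int × Int)),
      (PySem.List.enumerate suf (pre.length : Int)).foldl
        (fun ranges p =>
          let i := p.1
          let title := p.2.1
          let start_page := p.2.2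
          let end_page :=
            if i + 1 < (orig.length : Int) then
              (PySem.List.pyGetD orig (i + 1) ("", 0)).2 - 1
            else
              tp - 1
          if end_page ≥ start_page then ranges ++ [(title, start_page, end_page)] else ranges)
        acc
      = acc ++ pvSpec tp suf := by
  intro suf
  induction suf with
  | nil => intro pre h acc; simp [PySem.List.enumerate_nil, pvSpec]
  | cons x rest ih =>
    intro pre h acc
    obtain ⟨t, s⟩ := x
    rw [PySem.List.enumerate_cons, List.foldl_cons]
    have h2 := ih (pre ++ [(t, s)]) (by simp [h])
    have hcast : (((pre ++ [(t, s)]).length : Nat) : Int) = (pre.length : Int) + 1 := by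
      simp
    rw [hcast] at h2
    rw [h2]
    cases rest with
    | nil =>
      have hnc : ¬ ((pre.length : Int) + 1 < (orig.length : Int)) := by
        subst h; simp
      simp only [pvSpec]
      simp only [hnc, if_false, List.append_nil]
      by_cases hif : tp - 1 ≥ s <;> simp [hif]
    | cons y rest' =>
      obtain ⟨t', s'⟩ := y
      have hc : ((pre.length : Int) + 1 < (orig.length : Int)) := by
        subst h; simp
      have hget : PySem.List.pyGetD orig ((pre.length : Int) + 1) ("", 0) = (t', s') := by
        rw [← hcast, PySem.List.pyGetD_natCast]
        subst h
        have hsplit : (pre ++ (t, s) :: (t', s') :: rest') = (pre ++ [(t, s)]) ++ (t', s') :: rest' := by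
          simp
        rw [hsplit]
        simp [List.getD]
      simp only [pvSpec]
      simp only [hc, if_true, hget]
      by_cases hif : s' - 1 ≥ s <;> simp [hif]

theorem pvA_eq_spec (bookmarks : List (String × Int)) (tp : Int) :
    calculate_page_ranges bookmarks tp = pvSpec tp bookmarks := by
  unfold calculate_page_ranges
  have := pvA_go tp bookmarks bookmarks [] (by simp) []
  simpa using this

theorem pvB_eq_spec (bookmarks : List (String × Int)) (tp : Int) :
    calculate_page_ranges_alt bookmarks tp = pvSpec tp bookmarks := by
  unfold calculate_page_ranges_alt
  rw [pvB_go bookmarks tp []]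
  simp

-- ===== VERDICT (by name: the statement is the Claim_ definition above) =====
theorem calculate_page_ranges_spec : Claim_equal_calculate_page_ranges := by
  intro bookmarks total_pages _
  unfold Spec_calculate_page_ranges
  rw [pvA_eq_spec, pvB_eq_spec]
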